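-- pv_equiv track=rewrite | github.com/fqf2009/LeetCode | leetcode/lc2338_NumberOfIdealArrays.py | idealArrays
-- ===== SOURCE A (Python) =====
-- def idealArrays(n: int, maxValue: int) -> int:
--     mod = 10**9 + 7
--     dp = [1] * (maxValue + 1)
--     for _ in range(1, n):
--         dp2 = [0] * (maxValue + 1)
--         for j in range(1, maxValue + 1):
--             dp2[j] = sum(dp[k] for k in range(j, maxValue + 1, j)) % mod
--         dp = dp2
--
--     return sum(dp) % mod
-- ===== SOURCE B (Python) =====
-- def idealArrays(n: int, maxValue: int) -> int:
--     # Combinatorics instead of an n-step DP: count strict divisor chains of each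
--     # length, then stretch a chain of length l+1 to a non-decreasing array of
--     # length n in C(n-1, l) ways (stars and bars).
--     if maxValue <= 0:
--         return 0
--     mod = 10**9 + 7
--     # a strict divisor chain in 1..maxValue has at most bit_length(maxValue)
--     # elements, and a length-n array uses at most n distinct values
--     maxLen = min(maxValue.bit_length(), max(n, 0))
--     cur = [0] + [1] * maxValue      # cur[v] = number of strict chains of the current length starting at v
--     totals = [sum(cur) % mod]       # totals[l] = number of strict chains of length l+1
--     for _ in range(1, maxLen):
--         cur = [0] + [sum(cur[k] for k in range(2 * v, maxValue + 1, v))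
--                      for v in range(1, maxValue + 1)]
--         totals.append(sum(cur) % mod)
--     ans = 0
--     binom = 1                       # exact C(n-1, l) for the current l
--     for l in range(maxLen):
--         ans = (ans + totals[l] * binom) % mod
--         binom = binom * (n - 1 - l) // (l + 1)
--     return ans
-- ===== Notes on version B (the rewrite author's own statement) =====
-- stated objective: faster
-- what changed: Replaces the n-step divisor-transform DP (n-1 sieve passes over 1..maxValue) by combinatorics: count strict divisor chains of each length (at most bit_length(maxValue) sieve passes) and combine them with stars-and-bars binomials C(n-1,l), so the work no longer grows with n.
-- intended difference: For n = 1 with maxValue >= 0, A returns maxValue+1 because its dp array carries a spurious entry for the value 0 that the loop never clears; B returns the intended count maxValue (the arrays [v] with 1 <= v <= maxValue). — e.g. on idealArrays(1, 3): A returns 4, B returns 3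
-- outside the precondition, e.g. on idealArrays(0, 5): A returns 6, B returns 0; on idealArrays(-3, 7): A returns 8, B returns 0
import Mathlib
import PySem

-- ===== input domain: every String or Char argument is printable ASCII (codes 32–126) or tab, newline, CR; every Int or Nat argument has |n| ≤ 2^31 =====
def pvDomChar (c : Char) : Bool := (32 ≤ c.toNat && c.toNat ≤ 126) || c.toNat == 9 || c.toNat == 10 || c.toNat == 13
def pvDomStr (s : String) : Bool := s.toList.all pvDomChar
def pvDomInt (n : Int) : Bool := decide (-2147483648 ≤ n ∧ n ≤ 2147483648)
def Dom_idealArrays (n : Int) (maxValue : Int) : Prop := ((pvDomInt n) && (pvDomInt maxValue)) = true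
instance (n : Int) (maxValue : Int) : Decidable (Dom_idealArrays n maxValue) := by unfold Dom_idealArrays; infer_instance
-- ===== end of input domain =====

-- B replaces A's n-step divisor-transform DP by strict-divisor-chain counts combined
-- with stars-and-bars binomials C(n-1,l), so the work no longer grows linearly with n (faster).

-- ===== PORT A =====
def idealArrays (n : Int) (maxValue : Int) : Int :=
  let mod : Int := 10 ^ 9 + 7
  -- Python lists have O(1) indexing: dp is ported as an Array; all indices are
  -- in range and non-negative, so getD/setIfInBounds are exact
  let dp : Array Int := Array.replicate (maxValue + 1).toNat 1
  let dp :=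
    (PySem.List.pyRange 1 n 1).foldl
      (fun dp _ =>
        let dp2 : Array Int := Array.replicate (maxValue + 1).toNat 0
        let dp2 :=
          (PySem.List.pyRange 1 (maxValue + 1) 1).foldl
            (fun dp2 j =>
              dp2.setIfInBounds j.toNat
                (PySem.Int.mod
                  ((PySem.List.pyRange j (maxValue + 1) j).foldl
                    (fun s k => s + dp.getD k.toNat 0) 0)
                  mod))
            dp2
        dp2)
      dp
  PySem.Int.mod (dp.foldl (fun s x => s + x) 0) mod

-- ===== PORT B =====
def idealArrays_alt (n : Int) (maxValue : Int) : Int :=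
  if maxValue ≤ 0 then 0
  else
    let mod : Int := 10 ^ 9 + 7
    let maxLen : Int := min ((PySem.Int.bitLength maxValue : Nat) : Int) (max n 0)
    -- cur is ported as an Array (Python-list O(1) indexing); indices are in range
    let cur : Array Int := ((0 : Int) :: List.replicate maxValue.toNat 1).toArray
    let p : List Int × Array Int :=
      (PySem.List.pyRange 1 maxLen 1).foldl
        (fun (p : List Int × Array Int) _ =>
          let cur : Array Int :=
            ((0 : Int) :: (PySem.List.pyRange 1 (maxValue + 1) 1).map
              (fun v =>
                (PySem.List.pyRange (2 * v) (maxValue + 1) v).foldl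
                  (fun s k => s + p.2.getD k.toNat 0) 0)).toArray
          (p.1 ++ [PySem.Int.mod (cur.foldl (fun s x => s + x) 0) mod], cur))
        ([PySem.Int.mod (cur.foldl (fun s x => s + x) 0) mod], cur)
    let totals := p.1
    let r : Int × Int :=
      (PySem.List.pyRange 0 maxLen 1).foldl
        (fun (q : Int × Int) l =>
          (PySem.Int.mod (q.1 + PySem.List.pyGetD totals l 0 * q.2) mod,
           PySem.Int.floordiv (q.2 * (n - 1 - l)) (l + 1)))
        (0, 1)
    r.1

-- ===== PRECONDITION & SPEC =====
-- Pre_ excludes only n ≤ 0 with maxValue ≥ 0: a non-positive array length is outside the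
-- problem's domain; there A returns maxValue + 1 (an artefact of its dp initialisation,
-- whose spurious entry for the value 0 is never cleared) while B returns 0.
def Pre_idealArrays (n : Int) (maxValue : Int) : Prop := 1 ≤ n ∨ maxValue ≤ -1
instance (n : Int) (maxValue : Int) : Decidable (Pre_idealArrays n maxValue) := by
  unfold Pre_idealArrays; infer_instance

def pvWitness_idealArrays : Int × Int := (3, 6)

-- For n = 1 with maxValue ≥ 0, A returns maxValue+1: its dp array carries a spurious entry
-- for the value 0 which the loop never clears; B returns the intended count maxValue
-- (the arrays [v], 1 ≤ v ≤ maxValue).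
def D_idealArrays (n : Int) (maxValue : Int) : Prop := n = 1 ∧ 0 ≤ maxValue
instance (n : Int) (maxValue : Int) : Decidable (D_idealArrays n maxValue) := by
  unfold D_idealArrays; infer_instance

def Spec_idealArrays (n : Int) (maxValue : Int) (out : Int) : Prop :=
  ¬ D_idealArrays n maxValue → out = idealArrays_alt n maxValue
instance (n : Int) (maxValue : Int) (out : Int) : Decidable (Spec_idealArrays n maxValue out) := by
  unfold Spec_idealArrays; infer_instance

def pvDiffWitness_idealArrays : Int × Int := (1, 3)
def pvDiffWitnessOut_idealArrays : Int × Int := (4, 3)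

-- ===== CLAIM (what is proved, stated in full; the proofs are below) =====
def Claim_unchanged_idealArrays : Prop :=
  ∀ (n : Int) (maxValue : Int), Dom_idealArrays n maxValue → Pre_idealArrays n maxValue →
    Spec_idealArrays n maxValue (idealArrays n maxValue)
def Claim_changed_idealArrays : Prop :=
  Dom_idealArrays (pvDiffWitness_idealArrays.1) (pvDiffWitness_idealArrays.2) ∧
  Pre_idealArrays (pvDiffWitness_idealArrays.1) (pvDiffWitness_idealArrays.2) ∧
  D_idealArrays (pvDiffWitness_idealArrays.1) (pvDiffWitness_idealArrays.2) ∧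
  idealArrays (pvDiffWitness_idealArrays.1) (pvDiffWitness_idealArrays.2) = pvDiffWitnessOut_idealArrays.1 ∧
  idealArrays_alt (pvDiffWitness_idealArrays.1) (pvDiffWitness_idealArrays.2) = pvDiffWitnessOut_idealArrays.2 ∧
  pvDiffWitnessOut_idealArrays.1 ≠ pvDiffWitnessOut_idealArrays.2
def Claim_exact_idealArrays : Prop :=
  ∀ (n : Int) (maxValue : Int), Dom_idealArrays n maxValue → Pre_idealArrays n maxValue →
    D_idealArrays n maxValue → idealArrays n maxValue ≠ idealArrays_alt n maxValue

-- ===== LEMMAS AND PROOFS =====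


lemma pyRange_pos_cons (a b s : Int) (hs : 0 < s) (hab : a < b) :
    PySem.List.pyRange a b s = a :: PySem.List.pyRange (a + s) b s := by
  rw [PySem.List.pyRange_of_pos _ _ hs, PySem.List.pyRange_of_pos _ _ hs]
  have hq : (b - a + s - 1) / s = (b - (a + s) + s - 1) / s + 1 := by
    have h : b - a + s - 1 = (b - (a + s) + s - 1) + 1 * s := by ring
    rw [h, Int.add_mul_ediv_right _ _ (ne_of_gt hs)]
  rw [if_pos hab]
  have hcount : ((b - a + s - 1) / s).toNat
      = (if a + s < b then ((b - (a + s) + s - 1) / s).toNat else 0) + 1 := by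
    by_cases h2 : a + s < b
    · rw [if_pos h2, hq]
      have : 0 ≤ (b - (a + s) + s - 1) / s :=
        Int.ediv_nonneg (by omega) (le_of_lt hs)
      omega
    · rw [if_neg h2]
      have hz : (b - (a + s) + s - 1) / s = 0 := by
        apply Int.ediv_eq_zero_of_lt <;> omega
      rw [hq, hz]; rfl
  rw [hcount, List.range_succ_eq_map]
  simp [List.map_map, Function.comp]
  intro k _; push_cast; ring

lemma take_set_succ (l : List Int) (m : Nat) (v : Int) (h : m < l.length) :
    (l.set m v).take (m+1) = l.take m ++ [v] := by
  rw [List.take_set, List.take_add_one, List.set_append]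
  simp [Nat.min_eq_left (le_of_lt h), List.getElem?_eq_getElem h]

lemma foldl_pySetD_range (g : Int → Int) :
    ∀ (k : Nat) (init : List Int) (a : Int), 0 ≤ a → init.length - a.toNat = k →
      (PySem.List.pyRange a (init.length : Int) 1).foldl
        (fun acc j => PySem.List.pySetD acc j (g j)) init
      = init.take a.toNat ++ (PySem.List.pyRange a (init.length : Int) 1).map g := by
  intro k
  induction k with
  | zero =>
    intro init a ha hk
    have hge : (init.length : Int) ≤ a := by omega
    rw [PySem.List.pyRange_one_eq_nil hge]
    simp [List.take_of_length_le (by omega : init.length ≤ a.toNat)]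
  | succ k ih =>
    intro init a ha hk
    have hlt : a < (init.length : Int) := by omega
    rw [PySem.List.pyRange_one_cons hlt]
    simp only [List.foldl_cons, List.map_cons]
    rw [PySem.List.pySetD_of_nonneg (h := ha)]
    have hlen : (init.set a.toNat (g a)).length = init.length := by simp
    have ih' := ih (init.set a.toNat (g a)) (a + 1) (by omega) (by simp; omega)
    rw [hlen] at ih'
    rw [ih']
    have h1 : (a + 1).toNat = a.toNat + 1 := by omega
    rw [h1, take_set_succ _ _ _ (by omega)]
    simp

lemma foldl_pySetD_range' (g : Int → Int) (init : List Int) (b : Int)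
    (hb : b = (init.length : Int)) :
    (PySem.List.pyRange 1 b 1).foldl
      (fun acc j => PySem.List.pySetD acc j (g j)) init
    = init.take 1 ++ (PySem.List.pyRange 1 b 1).map g := by
  subst hb
  exact foldl_pySetD_range g (init.length - 1) init 1 (by omega) (by simp)

def pvMod : Int := 10 ^ 9 + 7

def chainF (m : Int) : Nat → Int → Int
  | 0, _ => 1
  | t + 1, j => ((PySem.List.pyRange j (m + 1) j).map (chainF m t)).sum

def chainC (m : Int) : Nat → Int → Int
  | 0, _ => 1
  | l + 1, j => ((PySem.List.pyRange (2 * j) (m + 1) j).map (chainC m l)).sum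

def dpForm (m : Int) (f : Int → Int) : List Int :=
  0 :: (PySem.List.pyRange 1 (m + 1) 1).map f

def stepA (m : Int) (dp : List Int) : List Int :=
  (PySem.List.pyRange 1 (m + 1) 1).foldl
    (fun dp2 j =>
      PySem.List.pySetD dp2 j
        (PySem.Int.mod
          ((PySem.List.pyRange j (m + 1) j).foldl
            (fun s k => s + PySem.List.pyGetD dp k 0) 0)
          pvMod))
    (List.replicate (m + 1).toNat 0)

lemma foldl_ignore_iterate {α β : Type} (F : α → α) (l : List β) (init : α) :
    l.foldl (fun d _ => F d) init = F^[l.length] init := by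
  induction l generalizing init with
  | nil => rfl
  | cons x xs ih => simp [List.foldl_cons, ih, Function.iterate_succ_apply]

lemma dpForm_eq_map (m : Int) (hm : 0 ≤ m) (f : Int → Int) :
    dpForm m f = (PySem.List.pyRange 0 (m + 1) 1).map
      (fun j => if j = 0 then 0 else f j) := by
  rw [dpForm, PySem.List.pyRange_one_cons (by omega : (0:Int) < m + 1)]
  simp only [List.map_cons, zero_add]
  congr 1
  apply List.map_congr_left
  intro j hj
  rw [PySem.List.mem_pyRange_one] at hj
  rw [if_neg (by omega)]

lemma pyGetD_dpForm (m : Int) (hm : 0 ≤ m) (f : Int → Int) (k : Int)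
    (h1 : 1 ≤ k) (h2 : k ≤ m) :
    PySem.List.pyGetD (dpForm m f) k 0 = f k := by
  rw [dpForm_eq_map m hm f,
    PySem.List.pyGetD_map_pyRange_of_nonneg _ _ _ _ (by omega) (by omega)]
  rw [if_neg (by omega)]

lemma pvMod_pos : (0:Int) < pvMod := by norm_num [pvMod]

lemma sum_map_emod (l : List Int) (f : Int → Int) :
    ((l.map (fun x => f x % pvMod)).sum) % pvMod = ((l.map f).sum) % pvMod := by
  induction l with
  | nil => rfl
  | cons x xs ih =>
    simp only [List.map_cons, List.sum_cons]
    rw [Int.add_emod, Int.emod_emod_of_dvd _ dvd_rfl, ih, ← Int.add_emod]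

lemma sum_map_mod (l : List Int) (f : Int → Int) :
    PySem.Int.mod (l.map (fun x => PySem.Int.mod (f x) pvMod)).sum pvMod
      = PySem.Int.mod (l.map f).sum pvMod := by
  simp only [PySem.Int.mod_eq_emod_of_pos pvMod_pos]
  exact sum_map_emod l f

lemma dpForm_congr (m : Int) (f g : Int → Int)
    (h : ∀ j, 1 ≤ j → j ≤ m → f j = g j) : dpForm m f = dpForm m g := by
  unfold dpForm
  have hmap : (PySem.List.pyRange 1 (m + 1) 1).map f = (PySem.List.pyRange 1 (m + 1) 1).map g := by
    apply List.map_congr_left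
    intro j hj
    rw [PySem.List.mem_pyRange_one] at hj
    exact h j (by omega) (by omega)
  rw [hmap]

lemma stepA_eq (m : Int) (hm : 0 ≤ m) (dp : List Int) :
    stepA m dp = dpForm m (fun j =>
      PySem.Int.mod ((PySem.List.pyRange j (m + 1) j).map
        (fun k => PySem.List.pyGetD dp k 0)).sum pvMod) := by
  unfold stepA
  simp only [PySem.List.foldl_add, zero_add]
  rw [foldl_pySetD_range' _ _ _ (by simp; omega)]
  rw [List.take_replicate]
  have : min 1 (m+1).toNat = 1 := by omega
  rw [this]
  rfl

lemma pyGetD_replicate_one (m : Int) (k : Int) (h1 : 0 ≤ k) (h2 : k ≤ m) :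
    PySem.List.pyGetD (List.replicate (m + 1).toNat (1:Int)) k 0 = 1 := by
  rw [PySem.List.pyGetD_of_nonneg (h := h1)]
  rw [List.getD_eq_getElem?_getD, List.getElem?_replicate]
  rw [if_pos (by omega)]
  rfl

lemma stepA_iter (m : Int) (hm : 0 ≤ m) (t : Nat) :
    (stepA m)^[t + 1] (List.replicate (m + 1).toNat 1)
      = dpForm m (fun j => PySem.Int.mod (chainF m (t + 1) j) pvMod) := by
  induction t with
  | zero =>
    rw [Function.iterate_one, stepA_eq m hm]
    apply dpForm_congr
    intro j h1 h2
    congr 1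
    show _ = ((PySem.List.pyRange j (m + 1) j).map (chainF m 0)).sum
    congr 1
    apply List.map_congr_left
    intro k hk
    rw [PySem.List.mem_pyRange_iff_of_pos (by omega)] at hk
    rw [pyGetD_replicate_one m k (by omega) (by omega)]
    rfl
  | succ t ih =>
    rw [Function.iterate_succ_apply', ih, stepA_eq m hm]
    apply dpForm_congr
    intro j h1 h2
    have hmap : (PySem.List.pyRange j (m + 1) j).map
        (fun k => PySem.List.pyGetD (dpForm m fun j => PySem.Int.mod (chainF m (t + 1) j) pvMod) k 0)
        = (PySem.List.pyRange j (m + 1) j).map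
          (fun k => PySem.Int.mod (chainF m (t + 1) k) pvMod) := by
      apply List.map_congr_left
      intro k hk
      rw [PySem.List.mem_pyRange_iff_of_pos (by omega)] at hk
      exact pyGetD_dpForm m hm _ k (by omega) (by omega)
    rw [hmap, sum_map_mod]
    rfl

-- Array/List bridge: the ports index Python lists through Arrays (O(1));
-- these lemmas relate the Array computation to its List counterpart
lemma arr_getD_toList (a : Array Int) (i : Nat) (v : Int) :
    a.getD i v = a.toList.getD i v := by
  rw [Array.getD_eq_getD_getElem?, List.getD_eq_getElem?_getD, ← Array.getElem?_toList]

lemma arr_read (a : Array Int) (k : Int) (hk : 0 ≤ k) (d : Int) :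
    a.getD k.toNat d = PySem.List.pyGetD a.toList k d := by
  rw [PySem.List.pyGetD_of_nonneg (h := hk), arr_getD_toList]

lemma arr_sum (a : Array Int) : a.foldl (fun s x => s + x) 0 = a.toList.sum := by
  rw [← Array.foldl_toList]
  simpa using PySem.List.foldl_add a.toList (fun x => x) 0

lemma foldl_setIfInBounds_toList (g : Int → Int) :
    ∀ (l : List Int), (∀ j ∈ l, 0 ≤ j) → ∀ (init : Array Int),
      (l.foldl (fun a j => a.setIfInBounds j.toNat (g j)) init).toList
        = l.foldl (fun a j => PySem.List.pySetD a j (g j)) init.toList := by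
  intro l
  induction l with
  | nil => intro _ init; rfl
  | cons x xs ih =>
    intro hl init
    simp only [List.foldl_cons]
    rw [ih (fun j hj => hl j (List.mem_cons_of_mem x hj))]
    rw [PySem.List.pySetD_of_nonneg (h := hl x (List.mem_cons_self))]
    rw [Array.toList_setIfInBounds]

def stepAr (m : Int) (dp : Array Int) : Array Int :=
  (PySem.List.pyRange 1 (m + 1) 1).foldl
    (fun dp2 j =>
      dp2.setIfInBounds j.toNat
        (PySem.Int.mod
          ((PySem.List.pyRange j (m + 1) j).foldl
            (fun s k => s + dp.getD k.toNat 0) 0)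
          pvMod))
    (Array.replicate (m + 1).toNat 0)

lemma stepAr_toList (m : Int) (dp : Array Int) :
    (stepAr m dp).toList = stepA m dp.toList := by
  unfold stepAr stepA
  have hbody : (PySem.List.pyRange 1 (m + 1) 1).foldl
      (fun (dp2 : Array Int) j =>
        dp2.setIfInBounds j.toNat
          (PySem.Int.mod
            ((PySem.List.pyRange j (m + 1) j).foldl
              (fun s k => s + dp.getD k.toNat 0) 0)
            pvMod))
      (Array.replicate (m + 1).toNat 0)
      = (PySem.List.pyRange 1 (m + 1) 1).foldl
        (fun (dp2 : Array Int) j =>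
          dp2.setIfInBounds j.toNat
            (PySem.Int.mod
              ((PySem.List.pyRange j (m + 1) j).foldl
                (fun s k => s + PySem.List.pyGetD dp.toList k 0) 0)
              pvMod))
        (Array.replicate (m + 1).toNat 0) := by
    apply PySem.List.foldl_congr_mem
    intro acc j hj
    rw [PySem.List.mem_pyRange_one] at hj
    congr 2
    apply PySem.List.foldl_congr_mem
    intro s k hk
    rw [PySem.List.mem_pyRange_iff_of_pos (by omega)] at hk
    rw [arr_read dp k (by omega)]
  rw [hbody]
  rw [foldl_setIfInBounds_toList _ _
    (by intro j hj; rw [PySem.List.mem_pyRange_one] at hj; omega)]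
  rw [Array.toList_replicate]

lemma stepAr_iter_toList (m : Int) (t : Nat) :
    ∀ dp : Array Int, ((stepAr m)^[t] dp).toList = (stepA m)^[t] dp.toList := by
  induction t with
  | zero => intro dp; rfl
  | succ t ih =>
    intro dp
    rw [Function.iterate_succ_apply, Function.iterate_succ_apply, ih, stepAr_toList]

lemma A_as_list (n m : Int) :
    idealArrays n m
      = PySem.Int.mod
          ((stepA m)^[(PySem.List.pyRange 1 n 1).length]
            (List.replicate (m + 1).toNat 1)).sum pvMod := by
  unfold idealArrays
  show PySem.Int.mod
      (((PySem.List.pyRange 1 n 1).foldl (fun dp _ => stepAr m dp)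
        (Array.replicate (m + 1).toNat 1)).foldl (fun s x => s + x) 0) pvMod = _
  rw [foldl_ignore_iterate, arr_sum, stepAr_iter_toList, Array.toList_replicate]

lemma idealArraysA (n m : Int) (hn : 2 ≤ n) (hm : 0 ≤ m) :
    idealArrays n m
    = PySem.Int.mod
        ((PySem.List.pyRange 1 (m + 1) 1).map (chainF m (n - 1).toNat)).sum pvMod := by
  rw [A_as_list, PySem.List.length_pyRange_one]
  obtain ⟨t, ht⟩ : ∃ t, (n - 1).toNat = t + 1 := ⟨(n-1).toNat - 1, by omega⟩
  rw [ht, stepA_iter m hm t]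
  unfold dpForm
  rw [List.sum_cons, zero_add, sum_map_mod, ← ht]

def chainTotal (m : Int) (l : Nat) : Int :=
  ((PySem.List.pyRange 1 (m + 1) 1).map (chainC m l)).sum

def sieveC (m : Int) (c : List Int) : List Int :=
  0 :: (PySem.List.pyRange 1 (m + 1) 1).map
    (fun v =>
      (PySem.List.pyRange (2 * v) (m + 1) v).foldl
        (fun s k => s + PySem.List.pyGetD c k 0) 0)

def bstep2 (m : Int) (p : List Int × List Int) : List Int × List Int :=
  (p.1 ++ [PySem.Int.mod (sieveC m p.2).sum pvMod], sieveC m p.2)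

lemma cur0_eq (m : Int) (hm : 0 ≤ m) :
    (0 :: List.replicate m.toNat (1:Int)) = dpForm m (chainC m 0) := by
  unfold dpForm
  congr 1
  have : (PySem.List.pyRange 1 (m + 1) 1).map (chainC m 0)
      = (PySem.List.pyRange 1 (m + 1) 1).map (fun _ => (1:Int)) := rfl
  rw [this, List.map_const', PySem.List.length_pyRange_one]
  congr 1
  omega

lemma sum_dpForm (m : Int) (i : Nat) :
    (dpForm m (chainC m i)).sum = chainTotal m i := by
  unfold dpForm
  rw [List.sum_cons, zero_add]
  rfl

lemma sieveC_dpForm (m : Int) (hm : 0 ≤ m) (i : Nat) :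
    sieveC m (dpForm m (chainC m i)) = dpForm m (chainC m (i + 1)) := by
  unfold sieveC dpForm
  congr 1
  apply List.map_congr_left
  intro v hv
  rw [PySem.List.mem_pyRange_one] at hv
  rw [PySem.List.foldl_add, zero_add]
  show _ = ((PySem.List.pyRange (2 * v) (m + 1) v).map (chainC m i)).sum
  congr 1
  apply List.map_congr_left
  intro k hk
  rw [PySem.List.mem_pyRange_iff_of_pos (by omega)] at hk
  exact pyGetD_dpForm m hm _ k (by omega) (by omega)

lemma chainLoop (m : Int) (hm : 0 ≤ m) (i : Nat) :
    (bstep2 m)^[i]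
        ([PySem.Int.mod (chainTotal m 0) pvMod], dpForm m (chainC m 0))
      = ((PySem.List.pyRange 0 ((i : Int) + 1) 1).map
          (fun l => PySem.Int.mod (chainTotal m l.toNat) pvMod),
         dpForm m (chainC m i)) := by
  induction i with
  | zero =>
    rw [Function.iterate_zero_apply]
    rw [show ((0:Nat):Int) + 1 = 0 + 1 from by norm_num,
      PySem.List.pyRange_one_singleton]
    simp
  | succ i ih =>
    rw [Function.iterate_succ_apply', ih]
    unfold bstep2
    rw [sieveC_dpForm m hm i, sum_dpForm]
    rw [show ((i + 1 : Nat) : Int) + 1 = ((i:Int) + 1) + 1 from by push_cast; ring]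
    conv_rhs => rw [PySem.List.pyRange_one_succ_right (by positivity), List.map_append]
    simp

def sieveArr (m : Int) (c : Array Int) : Array Int :=
  ((0 : Int) :: (PySem.List.pyRange 1 (m + 1) 1).map
    (fun v =>
      (PySem.List.pyRange (2 * v) (m + 1) v).foldl
        (fun s k => s + c.getD k.toNat 0) 0)).toArray

def bstep2A (m : Int) (p : List Int × Array Int) : List Int × Array Int :=
  (p.1 ++ [PySem.Int.mod ((sieveArr m p.2).foldl (fun s x => s + x) 0) pvMod],
   sieveArr m p.2)

lemma sieveArr_toList (m : Int) (c : Array Int) :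
    (sieveArr m c).toList = sieveC m c.toList := by
  unfold sieveArr sieveC
  rw [List.toList_toArray]
  congr 1
  apply List.map_congr_left
  intro v hv
  rw [PySem.List.mem_pyRange_one] at hv
  apply PySem.List.foldl_congr_mem
  intro s k hk
  rw [PySem.List.mem_pyRange_iff_of_pos (by omega)] at hk
  rw [arr_read c k (by omega)]

lemma bstep2A_bridge (m : Int) (p : List Int × Array Int) :
    ((bstep2A m p).1, (bstep2A m p).2.toList) = bstep2 m (p.1, p.2.toList) := by
  unfold bstep2A bstep2
  simp only [Prod.mk.injEq]
  refine ⟨?_, sieveArr_toList m p.2⟩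
  rw [arr_sum, sieveArr_toList]

lemma bstep2A_iter (m : Int) (i : Nat) :
    ∀ p : List Int × Array Int,
      (((bstep2A m)^[i] p).1, ((bstep2A m)^[i] p).2.toList)
        = (bstep2 m)^[i] (p.1, p.2.toList) := by
  induction i with
  | zero => intro p; rfl
  | succ i ih =>
    intro p
    rw [Function.iterate_succ_apply, Function.iterate_succ_apply, ih (bstep2A m p),
      bstep2A_bridge]

def chainS (m : Int) (T : Nat) (c : Nat) : Int :=
  ∑ l ∈ Finset.range c, chainTotal m l * ((T.choose l : Nat) : Int)

lemma mod_add_mul_mod (a b c : Int) :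
    PySem.Int.mod (PySem.Int.mod a pvMod + PySem.Int.mod b pvMod * c) pvMod
      = PySem.Int.mod (a + b * c) pvMod := by
  simp only [PySem.Int.mod_eq_emod_of_pos pvMod_pos]
  conv_lhs => rw [Int.add_emod, Int.mul_emod]
  conv_rhs => rw [Int.add_emod, Int.mul_emod]
  simp [Int.emod_emod_of_dvd _ dvd_rfl]

lemma binomLoop (m : Int) (n : Int) (hn : 1 ≤ n) (ML : Nat) (K : Int)
    (hK : K = min (ML : Int) n) :
    ∀ c : Nat, (c : Int) ≤ K →
      (PySem.List.pyRange 0 (c : Int) 1).foldl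
        (fun (q : Int × Int) l =>
          (PySem.Int.mod (q.1 + PySem.List.pyGetD
              ((PySem.List.pyRange 0 (ML : Int) 1).map
                (fun l => PySem.Int.mod (chainTotal m l.toNat) pvMod)) l 0 * q.2) pvMod,
           PySem.Int.floordiv (q.2 * (n - 1 - l)) (l + 1)))
        (0, 1)
      = (PySem.Int.mod (chainS m (n - 1).toNat c) pvMod, (((n - 1).toNat.choose c : Nat) : Int)) := by
  intro c
  induction c with
  | zero =>
    intro _
    rw [show ((0:Nat):Int) = 0 from rfl, PySem.List.pyRange_one_eq_nil le_rfl]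
    simp [chainS, PySem.Int.mod_eq_emod_of_pos pvMod_pos]
  | succ c ih =>
    intro hc
    have hc' : (c : Int) ≤ K := by push_cast at hc ⊢; omega
    have hcML : (c : Int) < (ML : Int) := by omega
    have hcn : (c : Int) ≤ n - 1 := by push_cast at hc; omega
    rw [show ((c+1 : Nat) : Int) = (c : Int) + 1 by push_cast; ring,
      PySem.List.pyRange_one_succ_right (by positivity), List.foldl_append, ih hc']
    simp only [List.foldl_cons, List.foldl_nil]
    rw [PySem.List.pyGetD_map_pyRange_of_nonneg _ _ _ _ (by positivity) hcML]
    simp only [Prod.mk.injEq]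
    refine ⟨?_, ?_⟩
    case _ =>
      rw [Int.toNat_natCast, mod_add_mul_mod]
      congr 1
      simp only [chainS]
      rw [Finset.sum_range_succ]
    case _ =>
      have harith : (((n-1).toNat.choose c : Nat) : Int) * (n - 1 - (c:Int))
          = (((n-1).toNat.choose (c+1) : Nat) : Int) * ((c:Int) + 1) := by
        have h1 : (n - 1 - (c:Int)) = (((n-1).toNat - c : Nat) : Int) := by
          push_cast; omega
        rw [h1]
        calc (((n-1).toNat.choose c : Nat) : Int) * (((n-1).toNat - c : Nat) : Int)
            = (((n-1).toNat.choose c * ((n-1).toNat - c) : Nat) : Int) := by push_cast [Nat.cast_mul]; ring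
          _ = (((n-1).toNat.choose (c+1) * (c+1) : Nat) : Int) := by
                rw [← Nat.choose_succ_right_eq]
          _ = (((n-1).toNat.choose (c+1) : Nat) : Int) * ((c:Int) + 1) := by push_cast; ring
      rw [PySem.Int.floordiv_eq_ediv_of_pos (by positivity), harith,
        Int.mul_ediv_cancel _ (by positivity)]


lemma bitLength_pos (m : Int) (hm : 1 ≤ m) : 1 ≤ PySem.Int.bitLength m := by
  by_contra h
  have h0 : PySem.Int.bitLength m = 0 := by omega
  have := PySem.Int.lt_two_pow_bitLength m
  rw [h0] at this
  simp at this
  omega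

lemma idealArraysB (n m : Int) (hn : 1 ≤ n) (hm : 1 ≤ m) :
    idealArrays_alt n m
      = PySem.Int.mod
          (chainS m (n - 1).toNat (min ((PySem.Int.bitLength m : Nat) : Int) n).toNat)
          pvMod := by
  unfold idealArrays_alt
  rw [if_neg (by omega : ¬ m ≤ 0)]
  show ((PySem.List.pyRange 0 (min ((PySem.Int.bitLength m : Nat) : Int) (max n 0)) 1).foldl
      (fun (q : Int × Int) l =>
        (PySem.Int.mod (q.1 + PySem.List.pyGetD
            (((PySem.List.pyRange 1 (min ((PySem.Int.bitLength m : Nat) : Int) (max n 0)) 1).foldl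
              (fun (p : List Int × Array Int) (_ : Int) => bstep2A m p)
              ([PySem.Int.mod ((((0 : Int) :: List.replicate m.toNat 1).toArray).foldl
                  (fun s x => s + x) 0) pvMod],
               ((0 : Int) :: List.replicate m.toNat 1).toArray)).1) l 0 * q.2) pvMod,
         PySem.Int.floordiv (q.2 * (n - 1 - l)) (l + 1)))
      (0, 1)).1 = _
  rw [max_eq_left (by omega : (0:Int) ≤ n)]
  have hB1 : 1 ≤ PySem.Int.bitLength m := bitLength_pos m hm
  set K := min ((PySem.Int.bitLength m : Nat) : Int) n with hKdef
  have hK1 : 1 ≤ K := by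
    have := min_choice ((PySem.Int.bitLength m : Nat) : Int) n
    omega
  rw [foldl_ignore_iterate, PySem.List.length_pyRange_one]
  rw [congrArg Prod.fst (bstep2A_iter m (K - 1).toNat
    ([PySem.Int.mod ((((0 : Int) :: List.replicate m.toNat 1).toArray).foldl
        (fun s x => s + x) 0) pvMod],
     ((0 : Int) :: List.replicate m.toNat 1).toArray))]
  rw [arr_sum, List.toList_toArray]
  rw [cur0_eq m (by omega), sum_dpForm]
  rw [chainLoop m (by omega) (K - 1).toNat]
  rw [show ((((K - 1).toNat : Nat) : Int) + 1) = K from by omega]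
  rw [show K = ((K.toNat : Nat) : Int) from by omega]
  rw [binomLoop m n hn K.toNat ((K.toNat : Nat) : Int)
    (by rw [show (((K.toNat : Nat) : Int)) = K from by omega]; rw [hKdef]
        have h1 : K ≤ n := min_le_right _ _
        rw [← hKdef]
        exact (min_eq_left h1).symm)
    K.toNat le_rfl]
  simp only [Int.toNat_natCast]
lemma sum_map_finset_sum (l : List Int) (s : Finset ℕ) (f : ℕ → Int → Int) :
    (l.map (fun k => ∑ i ∈ s, f i k)).sum = ∑ i ∈ s, (l.map (f i)).sum := by
  induction l with
  | nil => simp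
  | cons x xs ih => simp [ih, Finset.sum_add_distrib]

lemma chainF_eq (m : Int) :
    ∀ (t : Nat) (j : Int), 1 ≤ j → j ≤ m →
      chainF m t j = ∑ l ∈ Finset.range (t + 1), ((t.choose l : Nat) : Int) * chainC m l j := by
  intro t
  induction t with
  | zero => intro j h1 h2; simp [chainF, chainC]
  | succ t ih =>
    intro j h1 h2
    rw [chainF]
    rw [pyRange_pos_cons j (m + 1) j (by omega) (by omega)]
    have h2j : j + j = 2 * j := by ring
    rw [h2j]
    rw [List.map_cons, List.sum_cons]
    have hstrict : (PySem.List.pyRange (2 * j) (m + 1) j).map (chainF m t)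
        = (PySem.List.pyRange (2 * j) (m + 1) j).map
            (fun k => ∑ l ∈ Finset.range (t + 1), ((t.choose l : Nat) : Int) * chainC m l k) := by
      apply List.map_congr_left
      intro k hk
      rw [PySem.List.mem_pyRange_iff_of_pos (by omega)] at hk
      exact ih k (by omega) (by omega)
    rw [ih j h1 h2, hstrict, sum_map_finset_sum]
    have hC : ∀ l, ((PySem.List.pyRange (2 * j) (m + 1) j).map (fun k => ((t.choose l : Nat) : Int) * chainC m l k)).sum
        = ((t.choose l : Nat) : Int) * chainC m (l + 1) j := by
      intro l
      rw [List.sum_map_mul_left]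
      rfl
    rw [Finset.sum_congr rfl (fun l _ => hC l)]
    -- now: ∑_{l≤t} C(t,l) c_l j + ∑_{l≤t} C(t,l) c_{l+1} j = ∑_{l≤t+1} C(t+1,l) c_l j
    rw [Finset.sum_range_succ' (fun l => ((t+1).choose l : Int) * chainC m l j) (t+1)]
    rw [Finset.sum_range_succ' (fun l => ((t.choose l : Nat) : Int) * chainC m l j) t]
    have hsplit : ∀ l, (((t+1).choose (l+1) : Nat) : Int) * chainC m (l+1) j
        = ((t.choose (l+1) : Nat) : Int) * chainC m (l+1) j
          + ((t.choose l : Nat) : Int) * chainC m (l+1) j := by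
      intro l
      rw [Nat.choose_succ_succ']
      push_cast
      ring
    rw [Finset.sum_congr rfl (fun l _ => hsplit l), Finset.sum_add_distrib]
    have htail : ∑ l ∈ Finset.range (t+1), ((t.choose (l+1) : Nat) : Int) * chainC m (l+1) j
        = ∑ l ∈ Finset.range t, ((t.choose (l+1) : Nat) : Int) * chainC m (l+1) j := by
      rw [Finset.sum_range_succ, Nat.choose_succ_self]
      simp
    rw [htail]
    simp [Nat.choose_zero_right]
    ring

lemma pyRange_pos_nil (a b s : Int) (hs : 0 < s) (h : b ≤ a) :
    PySem.List.pyRange a b s = [] := by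
  rw [PySem.List.pyRange_of_pos _ _ hs, if_neg (by omega)]
  rfl

lemma chainC_vanish (m : Int) :
    ∀ (l : Nat) (j : Int), 1 ≤ j → m < j * 2 ^ (l + 1) → chainC m (l + 1) j = 0 := by
  intro l
  induction l with
  | zero =>
    intro j h1 h2
    rw [chainC, pyRange_pos_nil _ _ _ (by omega) (by omega)]
    rfl
  | succ l ih =>
    intro j h1 h2
    rw [chainC]
    apply List.sum_eq_zero
    intro x hx
    rw [List.mem_map] at hx
    obtain ⟨k, hk, rfl⟩ := hx
    rw [PySem.List.mem_pyRange_iff_of_pos (by omega)] at hk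
    apply ih k (by omega)
    calc m < j * 2 ^ (l + 2) := h2
      _ = (2 * j) * 2 ^ (l + 1) := by ring
      _ ≤ k * 2 ^ (l + 1) := by
          apply mul_le_mul_of_nonneg_right (by omega) (by positivity)

lemma chainTotal_vanish (m : Int) (l : Nat) (h : m < 2 ^ (l + 1)) :
    chainTotal m (l + 1) = 0 := by
  unfold chainTotal
  apply List.sum_eq_zero
  intro x hx
  rw [List.mem_map] at hx
  obtain ⟨j, hj, rfl⟩ := hx
  rw [PySem.List.mem_pyRange_one] at hj
  apply chainC_vanish m l j (by omega)
  calc m < 2 ^ (l + 1) := h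
    _ = 1 * 2 ^ (l + 1) := by ring
    _ ≤ j * 2 ^ (l + 1) := by
        apply mul_le_mul_of_nonneg_right (by omega) (by positivity)

lemma m_lt_two_pow (m : Int) (hm : 1 ≤ m) (l : Nat) (hl : PySem.Int.bitLength m ≤ l) :
    m < 2 ^ l := by
  have h1 := PySem.Int.lt_two_pow_bitLength m
  have h2 : m.natAbs < 2 ^ l := lt_of_lt_of_le h1 (Nat.pow_le_pow_right (by omega) hl)
  have h3 : m = (m.natAbs : Int) := by omega
  rw [h3]
  exact_mod_cast h2

lemma main_sum_eq (n m : Int) (hn : 2 ≤ n) (hm : 1 ≤ m) :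
    ((PySem.List.pyRange 1 (m + 1) 1).map (chainF m (n - 1).toNat)).sum
      = chainS m (n - 1).toNat (min ((PySem.Int.bitLength m : Nat) : Int) n).toNat := by
  have hmap : (PySem.List.pyRange 1 (m + 1) 1).map (chainF m (n - 1).toNat)
      = (PySem.List.pyRange 1 (m + 1) 1).map
          (fun j => ∑ l ∈ Finset.range ((n - 1).toNat + 1),
            (((n - 1).toNat.choose l : Nat) : Int) * chainC m l j) := by
    apply List.map_congr_left
    intro j hj
    rw [PySem.List.mem_pyRange_one] at hj
    exact chainF_eq m (n - 1).toNat j (by omega) (by omega)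
  rw [hmap, sum_map_finset_sum]
  have hterm : ∀ l, ((PySem.List.pyRange 1 (m + 1) 1).map
      (fun j => (((n - 1).toNat.choose l : Nat) : Int) * chainC m l j)).sum
      = (((n - 1).toNat.choose l : Nat) : Int) * chainTotal m l := by
    intro l
    rw [List.sum_map_mul_left]
    rfl
  rw [Finset.sum_congr rfl (fun l _ => hterm l)]
  rw [chainS]
  have hsub : Finset.range (min ((PySem.Int.bitLength m : Nat) : Int) n).toNat
      ⊆ Finset.range ((n - 1).toNat + 1) :=
    by
      intro x hx
      rw [Finset.mem_range] at hx ⊢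
      have := min_choice ((PySem.Int.bitLength m : Nat) : Int) n
      omega
  have hzero : ∀ l ∈ Finset.range ((n - 1).toNat + 1),
      l ∉ Finset.range (min ((PySem.Int.bitLength m : Nat) : Int) n).toNat →
      (((n - 1).toNat.choose l : Nat) : Int) * chainTotal m l = 0 := by
    intro l hl hnot
    rw [Finset.mem_range] at hl
    rw [Finset.mem_range, not_lt] at hnot
    have hbl : PySem.Int.bitLength m ≤ l := by
      have := min_choice ((PySem.Int.bitLength m : Nat) : Int) n
      omega
    have hl1 : 1 ≤ l := le_trans (bitLength_pos m hm) hbl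
    obtain ⟨l', rfl⟩ : ∃ l', l = l' + 1 := ⟨l - 1, by omega⟩
    rw [chainTotal_vanish m l' (m_lt_two_pow m hm (l' + 1) hbl)]
    ring
  rw [← Finset.sum_subset hsub hzero]
  exact Finset.sum_congr rfl (fun l _ => mul_comm _ _)


lemma mod_zero_pvMod : PySem.Int.mod 0 pvMod = 0 := by
  rw [PySem.Int.mod_eq_emod_of_pos pvMod_pos]
  rfl

lemma A_zero (n m : Int) (hm : m ≤ 0) (h : 2 ≤ n ∨ m ≤ -1) :
    idealArrays n m = 0 := by
  rw [A_as_list]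
  by_cases hneg : m ≤ -1
  · have hfix : stepA m ([] : List Int) = [] := by
      unfold stepA
      rw [pyRange_pos_nil _ _ _ (by omega) (by omega),
        show (m + 1).toNat = 0 by omega]
      rfl
    rw [show (m + 1).toNat = 0 by omega]
    show PySem.Int.mod ((stepA m)^[_] ([] : List Int)).sum pvMod = 0
    rw [Function.iterate_fixed hfix]
    exact mod_zero_pvMod
  · have hm0 : m = 0 := by omega
    have hn2 : 2 ≤ n := by
      rcases h with h | h
      · exact h
      · omega
    subst hm0
    have hconst : ∀ dp : List Int, stepA 0 dp = [0] := by
      intro dp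
      unfold stepA
      rw [show ((0:Int) + 1) = 1 from by norm_num, PySem.List.pyRange_one_eq_nil le_rfl]
      rfl
    obtain ⟨t, ht⟩ : ∃ t, (PySem.List.pyRange 1 n 1).length = t + 1 := by
      rw [PySem.List.length_pyRange_one]
      exact ⟨(n - 1).toNat - 1, by omega⟩
    rw [ht, Function.iterate_succ_apply, hconst, Function.iterate_fixed (hconst [0])]
    simp [mod_zero_pvMod]

lemma B_zero (n m : Int) (hm : m ≤ 0) : idealArrays_alt n m = 0 := by
  unfold idealArrays_alt
  rw [if_pos hm]

-- at n = 1 the dp of A consists of the m+1 initial ones, so A returns (m+1) mod p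
lemma A_one (m : Int) (hm : 0 ≤ m) :
    idealArrays 1 m = PySem.Int.mod (m + 1) pvMod := by
  rw [A_as_list]
  rw [show (PySem.List.pyRange 1 1 1).length = 0 from by
    rw [PySem.List.pyRange_one_eq_nil le_rfl]; rfl]
  rw [Function.iterate_zero_apply]
  congr 1
  rw [List.sum_replicate]
  simp
  omega

lemma chainTotal_zero (m : Int) (hm : 0 ≤ m) : chainTotal m 0 = m := by
  unfold chainTotal
  have : (PySem.List.pyRange 1 (m + 1) 1).map (chainC m 0)
      = (PySem.List.pyRange 1 (m + 1) 1).map (fun _ => (1:Int)) := rfl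
  rw [this, List.map_const', PySem.List.length_pyRange_one, List.sum_replicate]
  simp
  omega

lemma mod_succ_ne (a : Int) :
    PySem.Int.mod (a + 1) pvMod ≠ PySem.Int.mod a pvMod := by
  simp only [PySem.Int.mod_eq_emod_of_pos pvMod_pos]
  intro h
  have hM : pvMod = 1000000007 := by norm_num [pvMod]
  have h1 : (0:Int) ≤ a % pvMod := Int.emod_nonneg a (by omega)
  have h2 : a % pvMod < pvMod := Int.emod_lt_of_pos a pvMod_pos
  rw [Int.add_emod] at h
  rw [show (1:Int) % pvMod = 1 from by rw [hM]; norm_num] at h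
  by_cases hc : a % pvMod + 1 < pvMod
  · rw [Int.emod_eq_of_lt (by omega) hc] at h
    omega
  · rw [show a % pvMod + 1 = pvMod from by omega, Int.emod_self] at h
    omega

theorem final_unchanged (n m : Int) (hPre : 1 ≤ n ∨ m ≤ -1)
    (hD : ¬ (n = 1 ∧ 0 ≤ m)) :
    idealArrays n m = idealArrays_alt n m := by
  by_cases hm : m ≤ 0
  · rw [B_zero n m hm]
    by_cases hneg : m ≤ -1
    · exact A_zero n m hm (Or.inr hneg)
    · have hn2 : 2 ≤ n := by omega
      exact A_zero n m hm (Or.inl hn2)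
  · have hn : 2 ≤ n := by omega
    rw [idealArraysA n m hn (by omega), idealArraysB n m (by omega) (by omega)]
    congr 1
    exact main_sum_eq n m hn (by omega)

-- ===== VERDICT (by name: the statement is the Claim_ definition above) =====
theorem idealArrays_spec : Claim_unchanged_idealArrays := by
  intro n m _ hPre hD
  exact final_unchanged n m hPre hD

theorem idealArrays_changed : Claim_changed_idealArrays := by
  unfold Claim_changed_idealArrays; decide

theorem idealArrays_tight : Claim_exact_idealArrays := by
  intro n m _ _ hD
  obtain ⟨hn1, hm0⟩ := hD
  subst hn1
  rw [A_one m hm0]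
  by_cases hm : 1 ≤ m
  · rw [idealArraysB 1 m le_rfl hm]
    have hB1 : 1 ≤ PySem.Int.bitLength m := bitLength_pos m hm
    have hK : (min ((PySem.Int.bitLength m : Nat) : Int) 1).toNat = 1 := by
      have := min_choice ((PySem.Int.bitLength m : Nat) : Int) (1:Int)
      omega
    rw [hK]
    rw [show (1 - 1 : Int).toNat = 0 from rfl]
    rw [show chainS m 0 1 = chainTotal m 0 from by
      unfold chainS
      rw [Finset.sum_range_one]
      simp]
    rw [chainTotal_zero m hm0]
    exact mod_succ_ne m
  · have hm0' : m = 0 := by omega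
    subst hm0'
    rw [B_zero 1 0 le_rfl]
    intro h
    rw [show ((0:Int) + 1) = 1 from by norm_num] at h
    rw [PySem.Int.mod_eq_emod_of_pos pvMod_pos] at h
    have hM : pvMod = 1000000007 := by norm_num [pvMod]
    rw [Int.emod_eq_of_lt (by omega) (by omega)] at h
    omega
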